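-- pv_equiv track=rewrite | github.com/Rahini4524/EpiBot | integration.py | get_possible_diseases
-- ===== SOURCE A (Python) =====
-- disease_symptom_map = {
--     "Eczema": ["itching", "redness", "dry skin", "scaling"],
--     "Atopic Dermatitis": ["itching", "redness", "Swelling", "dry skin"],
--     "Psoriasis": ["scaling", "redness", "white patches"],
--     "Fungal Infection": ["itching", "redness", "blisters", "white patches", "scaling"],
--     "Melanoma": ["itching","dark spots / pigmentation", "lumps or growths"],
--     "Basal Cell Carcinoma": ["lumps or growths", "open wounds / pus"],
--     "Benign Tumors": ["lumps or growths"],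
--     "Warts / Molluscum": ["lumps or growths", "scaling"],
--     "Seborrheic Keratosis": ["dark spots / pigmentation", "scaling"],
-- }
--
-- def get_possible_diseases(user_symptoms):
--     user_positive_symptoms = {s.lower() for s, v in user_symptoms.items() if v}
--     matching_diseases = []
--
--     for disease, symptoms in disease_symptom_map.items():
--         disease_symptoms_set = set(s.lower() for s in symptoms)
--         if user_positive_symptoms.issubset(disease_symptoms_set):
--             matching_diseases.append(disease)
--
--     return matching_diseases if matching_diseases else ["unknown condition"]
-- ===== SOURCE B (Python) =====
-- disease_symptom_map = {
--     "Eczema": ["itching", "redness", "dry skin", "scaling"],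
--     "Atopic Dermatitis": ["itching", "redness", "Swelling", "dry skin"],
--     "Psoriasis": ["scaling", "redness", "white patches"],
--     "Fungal Infection": ["itching", "redness", "blisters", "white patches", "scaling"],
--     "Melanoma": ["itching","dark spots / pigmentation", "lumps or growths"],
--     "Basal Cell Carcinoma": ["lumps or growths", "open wounds / pus"],
--     "Benign Tumors": ["lumps or growths"],
--     "Warts / Molluscum": ["lumps or growths", "scaling"],
--     "Seborrheic Keratosis": ["dark spots / pigmentation", "scaling"],
-- }
--
-- def _build_index():
--     """Inverted index: lowercased symptom -> set of disease names having it."""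
--     index = {}
--     for disease, symptoms in disease_symptom_map.items():
--         for s in symptoms:
--             index.setdefault(s.lower(), set()).add(disease)
--     return index
--
-- def get_possible_diseases(user_symptoms):
--     index = _build_index()
--     candidates = set(disease_symptom_map)
--     for s, v in user_symptoms.items():
--         if v:
--             candidates &= index.get(s.lower(), set())
--     matches = [d for d in disease_symptom_map if d in candidates]
--     return matches if matches else ["unknown condition"]
-- ===== Notes on version B (the rewrite author's own statement) =====
-- stated objective: alternative
-- what changed: Replaces the per-disease subset test against the user's positive-symptom set by an inverted index (symptom -> diseases) and an incremental intersection of candidate disease sets, emitting survivors in map order.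
import Mathlib
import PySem

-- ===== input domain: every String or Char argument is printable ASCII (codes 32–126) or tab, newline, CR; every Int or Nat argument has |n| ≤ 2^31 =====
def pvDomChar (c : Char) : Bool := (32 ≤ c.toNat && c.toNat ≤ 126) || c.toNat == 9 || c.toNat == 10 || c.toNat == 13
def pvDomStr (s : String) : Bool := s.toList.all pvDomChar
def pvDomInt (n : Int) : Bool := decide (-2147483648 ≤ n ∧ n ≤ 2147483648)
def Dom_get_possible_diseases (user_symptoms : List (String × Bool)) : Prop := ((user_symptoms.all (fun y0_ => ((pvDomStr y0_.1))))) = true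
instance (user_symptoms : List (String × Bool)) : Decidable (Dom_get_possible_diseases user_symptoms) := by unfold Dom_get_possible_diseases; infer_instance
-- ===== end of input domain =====

-- B replaces A's per-disease subset test by an inverted symptom->diseases index and an
-- incremental intersection of candidate disease sets (objective: alternative decomposition).

-- the module-level constant disease_symptom_map (a dict literal; shared by both ports)
def diseaseSymptomMap : List (String × List String) := [
  ("Eczema", ["itching", "redness", "dry skin", "scaling"]),
  ("Atopic Dermatitis", ["itching", "redness", "Swelling", "dry skin"]),
  ("Psoriasis", ["scaling", "redness", "white patches"]),
  ("Fungal Infection", ["itching", "redness", "blisters", "white patches", "scaling"]),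
  ("Melanoma", ["itching", "dark spots / pigmentation", "lumps or growths"]),
  ("Basal Cell Carcinoma", ["lumps or growths", "open wounds / pus"]),
  ("Benign Tumors", ["lumps or growths"]),
  ("Warts / Molluscum", ["lumps or growths", "scaling"]),
  ("Seborrheic Keratosis", ["dark spots / pigmentation", "scaling"])]

-- ===== PORT A =====
-- user_symptoms is a Python dict; it is read as a dict (last value wins, first position kept)
def get_possible_diseases (user_symptoms : List (String × Bool)) : List String :=
  let d : PySem.Dict String Bool :=
    user_symptoms.foldl (fun d p => d.insert p.1 p.2) PySem.Dict.empty
  let user_positive_symptoms : PySem.Set String :=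
    PySem.Set.ofList ((d.items.filter (fun p => p.2)).map (fun p => PySem.Str.lower p.1))
  let matching_diseases : List String :=
    diseaseSymptomMap.foldl (fun acc p =>
      let disease_symptoms_set : PySem.Set String :=
        PySem.Set.ofList (p.2.map (fun s => PySem.Str.lower s))
      if PySem.Set.issubset user_positive_symptoms disease_symptoms_set then acc ++ [p.1]
      else acc) []
  if matching_diseases = [] then ["unknown condition"] else matching_diseases

-- ===== PORT B =====
-- helper _build_index: inverted index, lowercased symptom -> set of disease names having it
def buildIndex : PySem.Dict String (PySem.Set String) :=
  diseaseSymptomMap.foldl (fun idx p =>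
    p.2.foldl (fun idx s =>
      -- index.setdefault(s.lower(), set()).add(disease)
      idx.modify (PySem.Str.lower s) PySem.Set.empty (fun st => PySem.Set.add st p.1)) idx)
    PySem.Dict.empty

def get_possible_diseases_alt (user_symptoms : List (String × Bool)) : List String :=
  let index := buildIndex
  let d : PySem.Dict String Bool :=
    user_symptoms.foldl (fun d p => d.insert p.1 p.2) PySem.Dict.empty
  let candidates : PySem.Set String :=
    d.items.foldl (fun c p =>
      if p.2 then PySem.Set.inter c (index.getD (PySem.Str.lower p.1) PySem.Set.empty)
      else c)
      (PySem.Set.ofList (diseaseSymptomMap.map Prod.fst))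
  let matched := (diseaseSymptomMap.map Prod.fst).filter
    (fun n => PySem.Set.contains candidates n)
  if matched = [] then ["unknown condition"] else matched

-- ===== PRECONDITION & SPEC =====
def Spec_get_possible_diseases (user_symptoms : List (String × Bool)) (out : List String) : Prop := out = get_possible_diseases_alt user_symptoms
instance (user_symptoms : List (String × Bool)) (out : List String) : Decidable (Spec_get_possible_diseases user_symptoms out) := by unfold Spec_get_possible_diseases; infer_instance

-- ===== CLAIM (what is proved, stated in full; the proofs are below) =====
def Claim_equal_get_possible_diseases : Prop := ∀ (user_symptoms : List (String × Bool)), Dom_get_possible_diseases user_symptoms → Spec_get_possible_diseases user_symptoms (get_possible_diseases user_symptoms)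

-- ===== LEMMAS AND PROOFS =====

-- the inverted index, evaluated
lemma buildIndex_eq : buildIndex = PySem.Dict.mk [
    ("itching", ["Eczema", "Atopic Dermatitis", "Fungal Infection", "Melanoma"]),
    ("redness", ["Eczema", "Atopic Dermatitis", "Psoriasis", "Fungal Infection"]),
    ("dry skin", ["Eczema", "Atopic Dermatitis"]),
    ("scaling", ["Eczema", "Psoriasis", "Fungal Infection", "Warts / Molluscum", "Seborrheic Keratosis"]),
    ("swelling", ["Atopic Dermatitis"]),
    ("white patches", ["Psoriasis", "Fungal Infection"]),
    ("blisters", ["Fungal Infection"]),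
    ("dark spots / pigmentation", ["Melanoma", "Seborrheic Keratosis"]),
    ("lumps or growths", ["Melanoma", "Basal Cell Carcinoma", "Benign Tumors", "Warts / Molluscum"]),
    ("open wounds / pus", ["Basal Cell Carcinoma"])] := by rfl
lemma post_Eczema (t : String) :
    ("Eczema" ∈ PySem.Dict.getD buildIndex t ([] : PySem.Set String))
      ↔ t ∈ (["itching", "redness", "dry skin", "scaling"] : List String) := by
  by_cases h1 : t = "itching"; · subst h1; decide
  by_cases h2 : t = "redness"; · subst h2; decide
  by_cases h3 : t = "dry skin"; · subst h3; decide
  by_cases h4 : t = "scaling"; · subst h4; decide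
  by_cases h5 : t = "swelling"; · subst h5; decide
  by_cases h6 : t = "white patches"; · subst h6; decide
  by_cases h7 : t = "blisters"; · subst h7; decide
  by_cases h8 : t = "dark spots / pigmentation"; · subst h8; decide
  by_cases h9 : t = "lumps or growths"; · subst h9; decide
  by_cases h10 : t = "open wounds / pus"; · subst h10; decide
  rw [buildIndex_eq]
  simp [PySem.Dict.getD_eq_get?_getD, PySem.Dict.get?_mk_cons, PySem.Dict.get?_empty, PySem.Dict.get?,
    h1, h2, h3, h4, Ne.symm h1, Ne.symm h2, Ne.symm h3, Ne.symm h4, Ne.symm h5, Ne.symm h6, Ne.symm h7, Ne.symm h8, Ne.symm h9, Ne.symm h10]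

lemma post_Atopic (t : String) :
    ("Atopic Dermatitis" ∈ PySem.Dict.getD buildIndex t ([] : PySem.Set String))
      ↔ t ∈ (["itching", "redness", "swelling", "dry skin"] : List String) := by
  by_cases h1 : t = "itching"; · subst h1; decide
  by_cases h2 : t = "redness"; · subst h2; decide
  by_cases h3 : t = "dry skin"; · subst h3; decide
  by_cases h4 : t = "scaling"; · subst h4; decide
  by_cases h5 : t = "swelling"; · subst h5; decide
  by_cases h6 : t = "white patches"; · subst h6; decide
  by_cases h7 : t = "blisters"; · subst h7; decide
  by_cases h8 : t = "dark spots / pigmentation"; · subst h8; decide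
  by_cases h9 : t = "lumps or growths"; · subst h9; decide
  by_cases h10 : t = "open wounds / pus"; · subst h10; decide
  rw [buildIndex_eq]
  simp [PySem.Dict.getD_eq_get?_getD, PySem.Dict.get?_mk_cons, PySem.Dict.get?_empty, PySem.Dict.get?,
    h1, h2, h5, h3, Ne.symm h1, Ne.symm h2, Ne.symm h3, Ne.symm h4, Ne.symm h5, Ne.symm h6, Ne.symm h7, Ne.symm h8, Ne.symm h9, Ne.symm h10]

lemma post_Psoriasis (t : String) :
    ("Psoriasis" ∈ PySem.Dict.getD buildIndex t ([] : PySem.Set String))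
      ↔ t ∈ (["scaling", "redness", "white patches"] : List String) := by
  by_cases h1 : t = "itching"; · subst h1; decide
  by_cases h2 : t = "redness"; · subst h2; decide
  by_cases h3 : t = "dry skin"; · subst h3; decide
  by_cases h4 : t = "scaling"; · subst h4; decide
  by_cases h5 : t = "swelling"; · subst h5; decide
  by_cases h6 : t = "white patches"; · subst h6; decide
  by_cases h7 : t = "blisters"; · subst h7; decide
  by_cases h8 : t = "dark spots / pigmentation"; · subst h8; decide
  by_cases h9 : t = "lumps or growths"; · subst h9; decide
  by_cases h10 : t = "open wounds / pus"; · subst h10; decide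
  rw [buildIndex_eq]
  simp [PySem.Dict.getD_eq_get?_getD, PySem.Dict.get?_mk_cons, PySem.Dict.get?_empty, PySem.Dict.get?,
    h4, h2, h6, Ne.symm h1, Ne.symm h2, Ne.symm h3, Ne.symm h4, Ne.symm h5, Ne.symm h6, Ne.symm h7, Ne.symm h8, Ne.symm h9, Ne.symm h10]

lemma post_Fungal (t : String) :
    ("Fungal Infection" ∈ PySem.Dict.getD buildIndex t ([] : PySem.Set String))
      ↔ t ∈ (["itching", "redness", "blisters", "white patches", "scaling"] : List String) := by
  by_cases h1 : t = "itching"; · subst h1; decide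
  by_cases h2 : t = "redness"; · subst h2; decide
  by_cases h3 : t = "dry skin"; · subst h3; decide
  by_cases h4 : t = "scaling"; · subst h4; decide
  by_cases h5 : t = "swelling"; · subst h5; decide
  by_cases h6 : t = "white patches"; · subst h6; decide
  by_cases h7 : t = "blisters"; · subst h7; decide
  by_cases h8 : t = "dark spots / pigmentation"; · subst h8; decide
  by_cases h9 : t = "lumps or growths"; · subst h9; decide
  by_cases h10 : t = "open wounds / pus"; · subst h10; decide
  rw [buildIndex_eq]
  simp [PySem.Dict.getD_eq_get?_getD, PySem.Dict.get?_mk_cons, PySem.Dict.get?_empty, PySem.Dict.get?,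
    h1, h2, h7, h6, h4, Ne.symm h1, Ne.symm h2, Ne.symm h3, Ne.symm h4, Ne.symm h5, Ne.symm h6, Ne.symm h7, Ne.symm h8, Ne.symm h9, Ne.symm h10]

lemma post_Melanoma (t : String) :
    ("Melanoma" ∈ PySem.Dict.getD buildIndex t ([] : PySem.Set String))
      ↔ t ∈ (["itching", "dark spots / pigmentation", "lumps or growths"] : List String) := by
  by_cases h1 : t = "itching"; · subst h1; decide
  by_cases h2 : t = "redness"; · subst h2; decide
  by_cases h3 : t = "dry skin"; · subst h3; decide
  by_cases h4 : t = "scaling"; · subst h4; decide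
  by_cases h5 : t = "swelling"; · subst h5; decide
  by_cases h6 : t = "white patches"; · subst h6; decide
  by_cases h7 : t = "blisters"; · subst h7; decide
  by_cases h8 : t = "dark spots / pigmentation"; · subst h8; decide
  by_cases h9 : t = "lumps or growths"; · subst h9; decide
  by_cases h10 : t = "open wounds / pus"; · subst h10; decide
  rw [buildIndex_eq]
  simp [PySem.Dict.getD_eq_get?_getD, PySem.Dict.get?_mk_cons, PySem.Dict.get?_empty, PySem.Dict.get?,
    h1, h8, h9, Ne.symm h1, Ne.symm h2, Ne.symm h3, Ne.symm h4, Ne.symm h5, Ne.symm h6, Ne.symm h7, Ne.symm h8, Ne.symm h9, Ne.symm h10]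

lemma post_Basal (t : String) :
    ("Basal Cell Carcinoma" ∈ PySem.Dict.getD buildIndex t ([] : PySem.Set String))
      ↔ t ∈ (["lumps or growths", "open wounds / pus"] : List String) := by
  by_cases h1 : t = "itching"; · subst h1; decide
  by_cases h2 : t = "redness"; · subst h2; decide
  by_cases h3 : t = "dry skin"; · subst h3; decide
  by_cases h4 : t = "scaling"; · subst h4; decide
  by_cases h5 : t = "swelling"; · subst h5; decide
  by_cases h6 : t = "white patches"; · subst h6; decide
  by_cases h7 : t = "blisters"; · subst h7; decide
  by_cases h8 : t = "dark spots / pigmentation"; · subst h8; decide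
  by_cases h9 : t = "lumps or growths"; · subst h9; decide
  by_cases h10 : t = "open wounds / pus"; · subst h10; decide
  rw [buildIndex_eq]
  simp [PySem.Dict.getD_eq_get?_getD, PySem.Dict.get?_mk_cons, PySem.Dict.get?_empty, PySem.Dict.get?,
    h9, h10, Ne.symm h1, Ne.symm h2, Ne.symm h3, Ne.symm h4, Ne.symm h5, Ne.symm h6, Ne.symm h7, Ne.symm h8, Ne.symm h9, Ne.symm h10]

lemma post_Benign (t : String) :
    ("Benign Tumors" ∈ PySem.Dict.getD buildIndex t ([] : PySem.Set String))
      ↔ t ∈ (["lumps or growths"] : List String) := by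
  by_cases h1 : t = "itching"; · subst h1; decide
  by_cases h2 : t = "redness"; · subst h2; decide
  by_cases h3 : t = "dry skin"; · subst h3; decide
  by_cases h4 : t = "scaling"; · subst h4; decide
  by_cases h5 : t = "swelling"; · subst h5; decide
  by_cases h6 : t = "white patches"; · subst h6; decide
  by_cases h7 : t = "blisters"; · subst h7; decide
  by_cases h8 : t = "dark spots / pigmentation"; · subst h8; decide
  by_cases h9 : t = "lumps or growths"; · subst h9; decide
  by_cases h10 : t = "open wounds / pus"; · subst h10; decide
  rw [buildIndex_eq]
  simp [PySem.Dict.getD_eq_get?_getD, PySem.Dict.get?_mk_cons, PySem.Dict.get?_empty, PySem.Dict.get?,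
    h9, Ne.symm h1, Ne.symm h2, Ne.symm h3, Ne.symm h4, Ne.symm h5, Ne.symm h6, Ne.symm h7, Ne.symm h8, Ne.symm h9, Ne.symm h10]

lemma post_Warts (t : String) :
    ("Warts / Molluscum" ∈ PySem.Dict.getD buildIndex t ([] : PySem.Set String))
      ↔ t ∈ (["lumps or growths", "scaling"] : List String) := by
  by_cases h1 : t = "itching"; · subst h1; decide
  by_cases h2 : t = "redness"; · subst h2; decide
  by_cases h3 : t = "dry skin"; · subst h3; decide
  by_cases h4 : t = "scaling"; · subst h4; decide
  by_cases h5 : t = "swelling"; · subst h5; decide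
  by_cases h6 : t = "white patches"; · subst h6; decide
  by_cases h7 : t = "blisters"; · subst h7; decide
  by_cases h8 : t = "dark spots / pigmentation"; · subst h8; decide
  by_cases h9 : t = "lumps or growths"; · subst h9; decide
  by_cases h10 : t = "open wounds / pus"; · subst h10; decide
  rw [buildIndex_eq]
  simp [PySem.Dict.getD_eq_get?_getD, PySem.Dict.get?_mk_cons, PySem.Dict.get?_empty, PySem.Dict.get?,
    h9, h4, Ne.symm h1, Ne.symm h2, Ne.symm h3, Ne.symm h4, Ne.symm h5, Ne.symm h6, Ne.symm h7, Ne.symm h8, Ne.symm h9, Ne.symm h10]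

lemma post_Seborrheic (t : String) :
    ("Seborrheic Keratosis" ∈ PySem.Dict.getD buildIndex t ([] : PySem.Set String))
      ↔ t ∈ (["dark spots / pigmentation", "scaling"] : List String) := by
  by_cases h1 : t = "itching"; · subst h1; decide
  by_cases h2 : t = "redness"; · subst h2; decide
  by_cases h3 : t = "dry skin"; · subst h3; decide
  by_cases h4 : t = "scaling"; · subst h4; decide
  by_cases h5 : t = "swelling"; · subst h5; decide
  by_cases h6 : t = "white patches"; · subst h6; decide
  by_cases h7 : t = "blisters"; · subst h7; decide
  by_cases h8 : t = "dark spots / pigmentation"; · subst h8; decide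
  by_cases h9 : t = "lumps or growths"; · subst h9; decide
  by_cases h10 : t = "open wounds / pus"; · subst h10; decide
  rw [buildIndex_eq]
  simp [PySem.Dict.getD_eq_get?_getD, PySem.Dict.get?_mk_cons, PySem.Dict.get?_empty, PySem.Dict.get?,
    h8, h4, Ne.symm h1, Ne.symm h2, Ne.symm h3, Ne.symm h4, Ne.symm h5, Ne.symm h6, Ne.symm h7, Ne.symm h8, Ne.symm h9, Ne.symm h10]


lemma mem_foldl_inter (n : String) :
    ∀ (l : List (String × Bool)) (c : PySem.Set String),
      n ∈ l.foldl (fun c p =>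
          if p.2 then PySem.Set.inter c (buildIndex.getD (PySem.Str.lower p.1) PySem.Set.empty)
          else c) c ↔
        n ∈ c ∧ ∀ p ∈ l, p.2 = true → n ∈ buildIndex.getD (PySem.Str.lower p.1) PySem.Set.empty := by
  intro l
  induction l with
  | nil => simp
  | cons p l ih =>
    intro c
    by_cases h : p.2 = true
    · rw [List.foldl_cons, if_pos h, ih]
      simp [PySem.Set.mem_inter, h, and_assoc]
    · rw [List.foldl_cons, if_neg h, ih]
      simp [h]

lemma main_eq (l : List (String × Bool)) :
    List.foldl (fun acc (p : String × List String) =>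
      if PySem.Set.issubset
          (PySem.Set.ofList ((l.filter (fun p => p.2)).map (fun p => PySem.Str.lower p.1)))
          (PySem.Set.ofList (p.2.map (fun s => PySem.Str.lower s))) then acc ++ [p.1]
      else acc) [] diseaseSymptomMap
    = (diseaseSymptomMap.map Prod.fst).filter (fun n =>
        PySem.Set.contains
          (l.foldl (fun c p =>
            if p.2 then PySem.Set.inter c (buildIndex.getD (PySem.Str.lower p.1) PySem.Set.empty)
            else c) (PySem.Set.ofList (diseaseSymptomMap.map Prod.fst))) n) := by
  rw [PySem.List.foldl_append_if, List.filter_map, List.nil_append]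
  apply congrArg
  apply List.filter_congr
  intro p hp
  fin_cases hp <;>
    · rw [Bool.eq_iff_iff]
      simp only [Function.comp_apply]
      rw [PySem.Set.issubset_iff, PySem.Set.contains_iff, mem_foldl_inter]
      simp [PySem.Set.mem_ofList, List.mem_filter, List.mem_map, diseaseSymptomMap,
        post_Eczema, post_Atopic, post_Psoriasis, post_Fungal, post_Melanoma,
        post_Basal, post_Benign, post_Warts, post_Seborrheic, show PySem.Str.lower "itching" = "itching" from by decide, show PySem.Str.lower "redness" = "redness" from by decide, show PySem.Str.lower "dry skin" = "dry skin" from by decide, show PySem.Str.lower "scaling" = "scaling" from by decide, show PySem.Str.lower "Swelling" = "swelling" from by decide, show PySem.Str.lower "white patches" = "white patches" from by decide, show PySem.Str.lower "blisters" = "blisters" from by decide, show PySem.Str.lower "dark spots / pigmentation" = "dark spots / pigmentation" from by decide, show PySem.Str.lower "lumps or growths" = "lumps or growths" from by decide, show PySem.Str.lower "open wounds / pus" = "open wounds / pus" from by decide]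

-- ===== VERDICT (by name: the statement is the Claim_ definition above) =====
theorem get_possible_diseases_spec : Claim_equal_get_possible_diseases := by
  intro us _
  unfold Spec_get_possible_diseases get_possible_diseases get_possible_diseases_alt
  dsimp only
  rw [main_eq]
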